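-- pv_equiv track=rewrite | github.com/MrBrantCode/unitest_baseline | mut_generate/mist_train_taco/taco_18110/solution.py | maximize_sculpture_attractiveness
-- ===== SOURCE A (Python) =====
-- def maximize_sculpture_attractiveness(n, t):
--     max_sum = 0
--
--     # Calculate the sum of all sculptures initially
--     for i in range(n):
--         max_sum += t[i]
--
--     # Check for all possible regular polygons that can be formed
--     for i in range(2, n):
--         if n % i == 0 and n // i >= 3:
--             for j in range(i):
--                 current_sum = 0
--                 x = j
--                 while x < n:
--                     current_sum += t[x]
--                     x += i
--                 if current_sum > max_sum:
--                     max_sum = current_sum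
--
--     return max_sum
-- ===== SOURCE B (Python) =====
-- def maximize_sculpture_attractiveness(n, t):
--     best = sum(t[i] for i in range(n))
--     d = 1
--     while d * d <= n:
--         if n % d == 0:
--             for i in (d, n // d):
--                 if i >= 2 and n // i >= 3:
--                     sums = [0] * i
--                     for idx in range(n):
--                         sums[idx % i] += t[idx]
--                     best = max(best, max(sums))
--         d += 1
--     return best
-- ===== Notes on version B (the rewrite author's own statement) =====
-- stated objective: alternative
-- what changed: B finds the divisor strides by enumerating divisor pairs up to sqrt(n) instead of scanning all i in 2..n-1, and computes each stride's residue-class sums with one bucket pass (sums[idx % i] += t[idx]) instead of i separate strided while-loops; it trades A's Theta(n) divisor-test scan for a sqrt(n) one at the cost of modulo bucketing in the inner pass.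
import Mathlib
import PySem

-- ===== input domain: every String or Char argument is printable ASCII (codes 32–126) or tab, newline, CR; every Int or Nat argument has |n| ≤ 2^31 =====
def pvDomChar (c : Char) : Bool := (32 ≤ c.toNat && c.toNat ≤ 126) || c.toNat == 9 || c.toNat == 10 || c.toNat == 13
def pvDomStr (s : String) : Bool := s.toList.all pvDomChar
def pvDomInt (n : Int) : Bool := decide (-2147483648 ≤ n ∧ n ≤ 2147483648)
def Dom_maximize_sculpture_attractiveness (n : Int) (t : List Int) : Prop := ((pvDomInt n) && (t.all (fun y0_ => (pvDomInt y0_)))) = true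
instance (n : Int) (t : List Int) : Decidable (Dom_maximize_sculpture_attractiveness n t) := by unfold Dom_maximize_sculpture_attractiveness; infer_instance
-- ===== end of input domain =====

-- B replaces A's linear divisor scan by √n divisor-pair enumeration and A's per-residue
-- while-loops by a single bucket pass per divisor; return values agree on Pre_.

-- ===== PORT A =====
-- A's inner 'while x < n: current_sum += t[x]; x += i'; the '0 < i' conjunct is a
-- totality guard only (A only reaches the loop with i ≥ 2, where Python's loop terminates).
def whileSumA (t : List Int) (n x i : Int) : Int :=
  if _h : x < n ∧ 0 < i then PySem.List.pyGetD t x 0 + whileSumA t n (x + i) i else 0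
termination_by (n - x).toNat
decreasing_by omega

def maximize_sculpture_attractiveness (n : Int) (t : List Int) : Int :=
  let max_sum := (PySem.List.pyRange 0 n 1).foldl (fun acc i => acc + PySem.List.pyGetD t i 0) 0
  (PySem.List.pyRange 2 n 1).foldl (fun ms i =>
    if PySem.Int.mod n i = 0 ∧ 3 ≤ PySem.Int.floordiv n i then
      (PySem.List.pyRange 0 i 1).foldl (fun ms2 j =>
        let cur := whileSumA t n j i
        if cur > ms2 then cur else ms2) ms
    else ms) max_sum

-- ===== PORT B =====
-- 'sums = [0]*i; for idx in range(n): sums[idx % i] += t[idx]'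
def bucketsB (n i : Int) (t : List Int) : List Int :=
  (PySem.List.pyRange 0 n 1).foldl
    (fun s idx => PySem.List.pySetD s (PySem.Int.mod idx i)
        (PySem.List.pyGetD s (PySem.Int.mod idx i) 0 + PySem.List.pyGetD t idx 0))
    (List.replicate i.toNat 0)

-- loop body for one i of 'for i in (d, n // d)'; the 'none' branch of max? is
-- unreachable (i ≥ 2 makes the bucket list nonempty)
def procDivB (n : Int) (t : List Int) (best : Int) (i : Int) : Int :=
  if 2 ≤ i ∧ 3 ≤ PySem.Int.floordiv n i then
    match PySem.List.max? (bucketsB n i t) (fun x => x) with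
    | some m => max best m
    | none => best
  else best

-- 'd = 1; while d * d <= n: … d += 1' (d stays a nonnegative counter)
def bloopB (n : Int) (t : List Int) (best : Int) (d : Nat) : Int :=
  if _h : ((d * d : Nat) : Int) ≤ n then
    bloopB n t
      (if PySem.Int.mod n d = 0 then
        procDivB n t (procDivB n t best d) (PySem.Int.floordiv n d)
      else best) (d + 1)
  else best
termination_by n.toNat + 1 - d * d
decreasing_by
  have h1 : (d+1)*(d+1) = d*d + 2*d + 1 := by ring
  omega

def maximize_sculpture_attractiveness_alt (n : Int) (t : List Int) : Int :=
  bloopB n t ((PySem.List.pyRange 0 n 1).foldl (fun acc i => acc + PySem.List.pyGetD t i 0) 0) 1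

-- ===== PRECONDITION & SPEC =====
-- Pre_ excludes exactly the inputs where A raises IndexError (n exceeding len(t)).
def Pre_maximize_sculpture_attractiveness (n : Int) (t : List Int) : Prop := n ≤ (t.length : Int)
instance (n : Int) (t : List Int) : Decidable (Pre_maximize_sculpture_attractiveness n t) := by unfold Pre_maximize_sculpture_attractiveness; infer_instance
def pvWitness_maximize_sculpture_attractiveness : Int × List Int := (6, [1, -2, 3, 4, -5, 6])

def Spec_maximize_sculpture_attractiveness (n : Int) (t : List Int) (out : Int) : Prop := out = maximize_sculpture_attractiveness_alt n t
instance (n : Int) (t : List Int) (out : Int) : Decidable (Spec_maximize_sculpture_attractiveness n t out) := by unfold Spec_maximize_sculpture_attractiveness; infer_instance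

-- ===== CLAIM (what is proved, stated in full; the proofs are below) =====
def Claim_equal_maximize_sculpture_attractiveness : Prop := ∀ (n : Int) (t : List Int), Dom_maximize_sculpture_attractiveness n t → Pre_maximize_sculpture_attractiveness n t → Spec_maximize_sculpture_attractiveness n t (maximize_sculpture_attractiveness n t)

-- ===== LEMMAS AND PROOFS =====

theorem pv_witness_ok : Dom_maximize_sculpture_attractiveness pvWitness_maximize_sculpture_attractiveness.1 pvWitness_maximize_sculpture_attractiveness.2 ∧ Pre_maximize_sculpture_attractiveness pvWitness_maximize_sculpture_attractiveness.1 pvWitness_maximize_sculpture_attractiveness.2 := by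
  constructor <;> decide

-- sum of the residue class j (mod i) over t[0..m)
def csum (t : List Int) (i j m : Nat) : Int :=
  ∑ x ∈ Finset.range m, if x % i = j then t.getD x 0 else 0

-- strided sum from x, step i, over t[0..N)
def wspec (t : List Int) (N i x : Nat) : Int :=
  ∑ y ∈ Finset.range N, if x ≤ y ∧ i ∣ (y - x) then t.getD y 0 else 0

-- the maximum residue-class sum for stride i (i ≥ 1), in the shape max? returns it
def cmx (t : List Int) (N i : Nat) : Int :=
  ((List.range (i - 1)).map (fun j => csum t i (j + 1) N)).foldl max (csum t i 0 N)

theorem wspec_zero (t : List Int) (N i x : Nat) (h : N ≤ x) : wspec t N i x = 0 := by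
  apply Finset.sum_eq_zero
  intro y hy
  rw [Finset.mem_range] at hy
  rw [if_neg]
  rintro ⟨h1, -⟩; omega

theorem wspec_step (t : List Int) (N i x : Nat) (hi : 0 < i) (hx : x < N) :
    wspec t N i x = t.getD x 0 + wspec t N i (x + i) := by
  unfold wspec
  have key : ∀ y ∈ Finset.range N,
      (if x ≤ y ∧ i ∣ (y - x) then t.getD y 0 else 0)
      = (if y = x then t.getD y 0 else 0) + (if x + i ≤ y ∧ i ∣ (y - (x + i)) then t.getD y 0 else 0) := by
    intro y _
    by_cases hyx : y = x
    · subst hyx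
      rw [if_pos ⟨le_refl _, by simp⟩, if_pos rfl, if_neg (by rintro ⟨h1, -⟩; omega), add_zero]
    · rw [if_neg hyx, zero_add]
      have hiff : (x ≤ y ∧ i ∣ (y - x)) ↔ (x + i ≤ y ∧ i ∣ (y - (x + i))) := by
        constructor
        · rintro ⟨h1, c, hc⟩
          have hc0 : c ≠ 0 := by rintro rfl; omega
          have hle : i ≤ i * c := Nat.le_mul_of_pos_right i (by omega)
          refine ⟨by omega, c - 1, ?_⟩
          have hms : i * (c - 1) = i * c - i := by
            rcases c with _ | c
            · omega
            · simp [Nat.mul_succ]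
          omega
        · rintro ⟨h1, c, hc⟩
          refine ⟨by omega, c + 1, ?_⟩
          rw [Nat.mul_add]
          omega
      rw [if_congr hiff rfl rfl]
  rw [Finset.sum_congr rfl key, Finset.sum_add_distrib, Finset.sum_ite_eq' (Finset.range N) x,
      if_pos (Finset.mem_range.mpr hx)]

theorem whileSumA_fuel (t : List Int) (i : Nat) (hi : 0 < i) (N : Nat) :
    ∀ (k : Nat) (x : Nat), N - x ≤ k → whileSumA t (N : Int) (x : Int) (i : Int) = wspec t N i x := by
  intro k
  induction k with
  | zero =>
    intro x hx
    rw [whileSumA, dif_neg (by omega), wspec_zero t N i x (by omega)]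
  | succ k ih =>
    intro x hx
    by_cases hxN : x < N
    · rw [whileSumA, dif_pos ⟨by exact_mod_cast hxN, by exact_mod_cast hi⟩,
        wspec_step t N i x hi hxN]
      have hc : ((x : Int) + (i : Int)) = ((x + i : Nat) : Int) := by push_cast; ring
      rw [hc, ih (x + i) (by omega)]
      simp [PySem.List.pyGetD_natCast]
    · rw [whileSumA, dif_neg (by omega), wspec_zero t N i x (by omega)]

theorem whileSumA_eq_wspec (t : List Int) (i : Nat) (hi : 0 < i) (N x : Nat) :
    whileSumA t (N : Int) (x : Int) (i : Int) = wspec t N i x :=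
  whileSumA_fuel t i hi N (N - x) x le_rfl

theorem wspec_eq_csum (t : List Int) (N i j : Nat) (hj : j < i) :
    wspec t N i j = csum t i j N := by
  apply Finset.sum_congr rfl
  intro y _
  congr 1
  simp only [eq_iff_iff]
  constructor
  · rintro ⟨h1, c, hc⟩
    have : y = j + i * c := by omega
    subst this
    rw [Nat.add_mul_mod_self_left, Nat.mod_eq_of_lt hj]
  · intro h
    refine ⟨h ▸ Nat.mod_le y i, y / i, ?_⟩
    have := Nat.div_add_mod y i
    omega

theorem csum_succ (t : List Int) (i j m : Nat) :
    csum t i j (m + 1) = csum t i j m + (if m % i = j then t.getD m 0 else 0) := by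
  unfold csum
  rw [Finset.sum_range_succ]

theorem buckets_fold (t : List Int) (i : Nat) (hi : 0 < i) : ∀ m : Nat,
    (List.range m).foldl
      (fun (s : List Int) (idx : Nat) => PySem.List.pySetD s (PySem.Int.mod (idx : Int) (i : Int))
        (PySem.List.pyGetD s (PySem.Int.mod (idx : Int) (i : Int)) 0 + PySem.List.pyGetD t (idx : Int) 0))
      (List.replicate i 0)
    = (List.range i).map (fun j => csum t i j m) := by
  intro m
  induction m with
  | zero =>
    simp only [List.range_zero, List.foldl_nil]
    apply List.ext_getElem
    · simp
    · intro k h1 h2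
      simp [csum]
  | succ m ih =>
    rw [List.range_succ, List.foldl_append, ih, List.foldl_cons, List.foldl_nil]
    rw [PySem.Int.mod_natCast, PySem.List.pySetD_natCast, PySem.List.pyGetD_natCast,
        PySem.List.pyGetD_natCast]
    apply List.ext_getElem
    · simp
    · intro k h1 h2
      simp only [List.length_set, List.length_map, List.length_range] at h1 h2
      rw [List.getElem_set, List.getElem_map, List.getElem_range]
      rw [List.getElem_map, List.getElem_range]
      by_cases hk : m % i = k
      · have hmk : m % i < i := Nat.mod_lt m hi
        subst hk
        rw [if_pos rfl, csum_succ, if_pos rfl]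
        congr 1
        rw [List.getD_eq_getElem _ _ (by simpa using hmk), List.getElem_map, List.getElem_range]
      · rw [if_neg hk, csum_succ, if_neg hk, add_zero]

theorem bucketsB_eq (t : List Int) (i : Nat) (hi : 0 < i) (n : Int) :
    bucketsB n (i : Int) t = (List.range i).map (fun j => csum t i j n.toNat) := by
  unfold bucketsB
  rw [PySem.List.pyRange_zero, List.foldl_map, Int.toNat_natCast]
  exact buckets_fold t i hi n.toNat

theorem range_eq_cons (i : Nat) (hi : 0 < i) :
    List.range i = 0 :: (List.range (i-1)).map (fun j => j + 1) := by
  rcases i with _ | i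
  · omega
  · simp [List.range_succ_eq_map]

theorem maxq_map_range (f : Nat → Int) (i : Nat) (hi : 0 < i) :
    PySem.List.max? ((List.range i).map f) (fun x => x)
      = some (((List.range (i-1)).map (fun (j : Nat) => f (j + 1))).foldl max (f 0)) := by
  rw [range_eq_cons i hi, List.map_cons, PySem.List.max?_id_cons, List.map_map]
  rfl

theorem maxq_buckets (t : List Int) (i : Nat) (hi : 0 < i) (n : Int) :
    PySem.List.max? (bucketsB n (i : Int) t) (fun x => x) = some (cmx t n.toNat i) := by
  rw [bucketsB_eq t i hi n, maxq_map_range _ i hi]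
  rfl

theorem foldl_max_shift {α : Type} (g : α → Int) (l : List α) : ∀ (c b : Int),
    l.foldl (fun a x => max a (g x)) (max c b) = max c (l.foldl (fun a x => max a (g x)) b) := by
  induction l with
  | nil => intro c b; simp
  | cons y l ih =>
    intro c b
    simp only [List.foldl_cons]
    rw [max_assoc, ih]

theorem foldl_max_le (g : Int → Int) (l : List Int) : ∀ (c M : Int), c ≤ M → (∀ x ∈ l, g x ≤ M) →
    l.foldl (fun a x => max a (g x)) c ≤ M := by
  induction l with
  | nil => intro c M hc _; simpa using hc
  | cons y l ih =>
    intro c M hc hl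
    simp only [List.foldl_cons]
    exact ih _ M (max_le hc (hl y List.mem_cons_self)) (fun x hx => hl x (List.mem_cons_of_mem _ hx))

theorem le_foldl_max' (g : Int → Int) (l : List Int) : ∀ (c : Int),
    c ≤ l.foldl (fun a x => max a (g x)) c ∧ ∀ x ∈ l, g x ≤ l.foldl (fun a x => max a (g x)) c := by
  induction l with
  | nil => intro c; simp
  | cons y l ih =>
    intro c
    simp only [List.foldl_cons]
    obtain ⟨h1, h2⟩ := ih (max c (g y))
    refine ⟨le_trans (le_max_left _ _) h1, ?_⟩
    intro x hx
    rcases List.mem_cons.mp hx with rfl | hx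
    · exact le_trans (le_max_right _ _) h1
    · exact h2 x hx

theorem foldl_max_ext (g : Int → Int) (l1 l2 : List Int) (h : ∀ x, x ∈ l1 ↔ x ∈ l2) (c : Int) :
    l1.foldl (fun a x => max a (g x)) c = l2.foldl (fun a x => max a (g x)) c := by
  apply le_antisymm
  · exact foldl_max_le g l1 c _ (le_foldl_max' g l2 c).1
      (fun x hx => (le_foldl_max' g l2 c).2 x ((h x).mp hx))
  · exact foldl_max_le g l2 c _ (le_foldl_max' g l1 c).1
      (fun x hx => (le_foldl_max' g l1 c).2 x ((h x).mpr hx))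

theorem innerA_gen (w : Int → Int) (i : Nat) (hi : 0 < i) (ms : Int) :
    (PySem.List.pyRange 0 (i : Int) 1).foldl (fun ms2 j => if w j > ms2 then w j else ms2) ms
      = max ms (((List.range (i-1)).map (fun (j : Nat) => w (((j + 1 : Nat) : Int)))).foldl max
          (w ((0 : Nat) : Int))) := by
  have hstep : ∀ (a : Int) (j : Int), (if w j > a then w j else a) = max a (w j) := by
    intro a j
    rcases max_cases a (w j) with ⟨h1, h2⟩ | ⟨h1, h2⟩ <;> simp [h1] <;> omega
  rw [PySem.List.pyRange_zero, Int.toNat_natCast, List.foldl_map]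
  simp only [hstep]
  rw [range_eq_cons i hi, List.foldl_cons, List.foldl_map, List.foldl_map]
  exact foldl_max_shift (fun (j : Nat) => w (((j + 1 : Nat) : Int))) _ ms (w ((0:Nat):Int))

theorem innerA_eq (t : List Int) (n : Int) (hn : 0 ≤ n) (i : Int) (hi : 2 ≤ i) (ms : Int) :
    (PySem.List.pyRange 0 i 1).foldl (fun ms2 j =>
        let cur := whileSumA t n j i
        if cur > ms2 then cur else ms2) ms
      = max ms (cmx t n.toNat i.toNat) := by
  have hI : ((i.toNat : Nat) : Int) = i := Int.toNat_of_nonneg (by omega)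
  have hN : ((n.toNat : Nat) : Int) = n := Int.toNat_of_nonneg hn
  conv_lhs => rw [← hI]
  have hw : ∀ (j : Nat), j < i.toNat →
      whileSumA t n ((j : Nat) : Int) ((i.toNat : Nat) : Int) = csum t i.toNat j n.toNat := by
    intro j hj
    calc whileSumA t n ((j : Nat) : Int) ((i.toNat : Nat) : Int)
        = whileSumA t ((n.toNat : Nat) : Int) ((j : Nat) : Int) ((i.toNat : Nat) : Int) := by
          rw [hN]
      _ = wspec t n.toNat i.toNat j := whileSumA_eq_wspec t i.toNat (by omega) n.toNat j
      _ = csum t i.toNat j n.toNat := wspec_eq_csum t n.toNat i.toNat j hj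
  refine Eq.trans
    (innerA_gen (fun j => whileSumA t n j ((i.toNat : Nat) : Int)) i.toNat (by omega) ms) ?_
  congr 1
  rw [List.map_congr_left (fun j hj => hw (j+1) (by
        have := List.mem_range.mp hj; omega)), hw 0 (by omega)]
  rfl

def pairsB (n : Int) (d : Nat) : List Int :=
  if PySem.Int.mod n (d : Int) = 0 then
    [(d : Int), PySem.Int.floordiv n (d : Int)].filter
      (fun i => decide (2 ≤ i ∧ 3 ≤ PySem.Int.floordiv n i))
  else []

def dcands (n : Int) (d : Nat) : List Int :=
  (List.range' d (Nat.sqrt n.toNat + 1 - d)).flatMap (pairsB n)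

theorem procDivB_eq (t : List Int) (n : Int) (best i : Int) :
    procDivB n t best i
      = if 2 ≤ i ∧ 3 ≤ PySem.Int.floordiv n i then max best (cmx t n.toNat i.toNat) else best := by
  unfold procDivB
  by_cases h : 2 ≤ i ∧ 3 ≤ PySem.Int.floordiv n i
  · rw [if_pos h, if_pos h]
    have hi' : ((i.toNat : Nat) : Int) = i := Int.toNat_of_nonneg (by omega)
    conv_lhs => rw [← hi', maxq_buckets t i.toNat (by omega) n]
  · rw [if_neg h, if_neg h]

theorem pair_fold (t : List Int) (n : Int) (best : Int) (d : Nat) :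
    (if PySem.Int.mod n (d : Int) = 0 then
        procDivB n t (procDivB n t best (d : Int)) (PySem.Int.floordiv n (d : Int))
      else best)
    = (pairsB n d).foldl (fun a i => max a (cmx t n.toNat i.toNat)) best := by
  unfold pairsB
  by_cases h : PySem.Int.mod n (d : Int) = 0
  · rw [if_pos h, if_pos h, ← PySem.List.foldl_ite_eq_foldl_filter]
    simp only [List.foldl_cons, List.foldl_nil]
    rw [procDivB_eq, procDivB_eq]
  · rw [if_neg h, if_neg h, List.foldl_nil]

theorem bloopB_eq (t : List Int) (n : Int) (hn : 0 ≤ n) :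
    ∀ (k d : Nat), 1 ≤ d → Nat.sqrt n.toNat + 1 - d ≤ k → ∀ (best : Int),
    bloopB n t best d = (dcands n d).foldl (fun a i => max a (cmx t n.toNat i.toNat)) best := by
  intro k
  induction k with
  | zero =>
    intro d hd hk best
    have hds : Nat.sqrt n.toNat < d := by omega
    have hgt : ¬ (((d * d : Nat) : Int) ≤ n) := by
      intro hle
      have : d * d ≤ n.toNat := by omega
      exact absurd (Nat.le_sqrt.mpr this) (by omega)
    rw [bloopB, dif_neg hgt]
    unfold dcands
    rw [Nat.sub_eq_zero_of_le (by omega), List.range'_zero, List.flatMap_nil, List.foldl_nil]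
  | succ k ih =>
    intro d hd hk best
    by_cases hle : ((d * d : Nat) : Int) ≤ n
    · have hds : d ≤ Nat.sqrt n.toNat := Nat.le_sqrt.mpr (by omega)
      rw [bloopB, dif_pos hle]
      rw [ih (d+1) (by omega) (by omega)]
      unfold dcands
      have hcnt : Nat.sqrt n.toNat + 1 - d = (Nat.sqrt n.toNat + 1 - (d+1)) + 1 := by omega
      rw [hcnt, List.range'_succ, List.flatMap_cons, List.foldl_append, pair_fold]
    · have hds : Nat.sqrt n.toNat < d := by
        by_contra hc
        have hc' : d ≤ Nat.sqrt n.toNat := by omega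
        have h2 : d * d ≤ Nat.sqrt n.toNat * Nat.sqrt n.toNat := Nat.mul_le_mul hc' hc'
        have h3 : d * d ≤ n.toNat := le_trans h2 (Nat.sqrt_le n.toNat)
        exact hle (by omega)
      rw [bloopB, dif_neg hle]
      unfold dcands
      rw [Nat.sub_eq_zero_of_le (by omega), List.range'_zero, List.flatMap_nil, List.foldl_nil]

-- a valid candidate is smaller than n
theorem cand_lt (n x : Int) (hx2 : 2 ≤ x) (hdvd : x ∣ n) (h3 : 3 ≤ PySem.Int.floordiv n x) :
    x < n := by
  rw [PySem.Int.floordiv_eq_ediv_of_pos (by omega)] at h3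
  have h := mul_le_mul_of_nonneg_left h3 (by omega : (0:Int) ≤ x)
  rw [Int.mul_ediv_cancel' hdvd] at h
  omega

theorem cands_mem (n : Int) (hn : 0 ≤ n) (x : Int) :
    x ∈ dcands n 1 ↔ x ∈ (PySem.List.pyRange 2 n 1).filter
      (fun i => decide (PySem.Int.mod n i = 0 ∧ 3 ≤ PySem.Int.floordiv n i)) := by
  rw [List.mem_filter, PySem.List.mem_pyRange_one, decide_eq_true_eq]
  unfold dcands
  rw [List.mem_flatMap]
  constructor
  · rintro ⟨d, hd, hx⟩
    rw [List.mem_range'_1] at hd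
    have hds : d ≤ Nat.sqrt n.toNat := by omega
    unfold pairsB at hx
    by_cases hm : PySem.Int.mod n (d : Int) = 0
    · rw [if_pos hm] at hx
      have hdvd : (d : Int) ∣ n := (PySem.Int.mod_eq_zero_iff_dvd n _).mp hm
      rw [List.mem_filter, decide_eq_true_eq] at hx
      obtain ⟨hmem, hx2, h3⟩ := hx
      have hxdvd : x ∣ n := by
        rcases List.mem_pair.mp hmem with rfl | rfl
        · exact hdvd
        · rw [PySem.Int.floordiv_eq_ediv_of_pos (by omega : (0:Int) < (d:Int))]
          exact Int.ediv_dvd_of_dvd hdvd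
      have hmx : PySem.Int.mod n x = 0 := (PySem.Int.mod_eq_zero_iff_dvd n x).mpr hxdvd
      exact ⟨⟨hx2, cand_lt n x hx2 hxdvd h3⟩, hmx, h3⟩
    · rw [if_neg hm] at hx
      exact absurd hx (List.not_mem_nil)
  · rintro ⟨⟨hx2, hxn⟩, hmod, h3⟩
    have hdvd : x ∣ n := (PySem.Int.mod_eq_zero_iff_dvd n x).mp hmod
    have hx0 : (0:Int) < x := by omega
    have hq := Int.mul_ediv_cancel' hdvd
    rw [PySem.Int.floordiv_eq_ediv_of_pos hx0] at h3
    by_cases hxx : x * x ≤ n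
    · refine ⟨x.toNat, ?_, ?_⟩
      · rw [List.mem_range'_1]
        have hc : ((x.toNat * x.toNat : Nat) : Int) = x * x := by
          push_cast [Int.toNat_of_nonneg (by omega : (0:Int) ≤ x)]; ring
        have hle : x.toNat * x.toNat ≤ n.toNat := by omega
        have := Nat.le_sqrt.mpr hle
        omega
      · unfold pairsB
        rw [Int.toNat_of_nonneg (by omega : (0:Int) ≤ x), if_pos hmod, List.mem_filter,
            decide_eq_true_eq]
        refine ⟨List.mem_cons_self, hx2, ?_⟩
        rw [PySem.Int.floordiv_eq_ediv_of_pos hx0]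
        exact h3
    · set q := n / x with hqdef
      have hq3 : 3 ≤ q := h3
      have hqx : q < x := by
        by_contra hc
        have hc' : x ≤ q := by omega
        have := mul_le_mul_of_nonneg_left hc' (by omega : (0:Int) ≤ x)
        rw [hq] at this
        omega
      have hqdvd : q ∣ n := ⟨x, by linarith [hq, mul_comm x q]⟩
      have hqq : q * q ≤ n := by
        have h1 : q * q ≤ q * x := mul_le_mul_of_nonneg_left (le_of_lt hqx) (by omega)
        have h2 : q * x = n := by rw [mul_comm]; exact hq
        omega
      refine ⟨q.toNat, ?_, ?_⟩
      · rw [List.mem_range'_1]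
        have hc : ((q.toNat * q.toNat : Nat) : Int) = q * q := by
          push_cast [Int.toNat_of_nonneg (by omega : (0:Int) ≤ q)]; ring
        have hle : q.toNat * q.toNat ≤ n.toNat := by omega
        have := Nat.le_sqrt.mpr hle
        omega
      · unfold pairsB
        rw [Int.toNat_of_nonneg (by omega : (0:Int) ≤ q),
            if_pos ((PySem.Int.mod_eq_zero_iff_dvd n q).mpr hqdvd), List.mem_filter,
            decide_eq_true_eq]
        have hfd : PySem.Int.floordiv n q = x := by
          rw [PySem.Int.floordiv_eq_ediv_of_pos (by omega : (0:Int) < q), ← hq,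
              mul_comm, Int.mul_ediv_cancel_left _ (by omega : q ≠ 0)]
        refine ⟨?_, hx2, ?_⟩
        · rw [hfd]; exact List.mem_cons_of_mem _ List.mem_cons_self
        · rw [PySem.Int.floordiv_eq_ediv_of_pos hx0]; exact h3

-- ===== VERDICT (by name: the statement is the Claim_ definition above) =====
theorem maximize_sculpture_attractiveness_spec : Claim_equal_maximize_sculpture_attractiveness := by
  intro n t _ _
  unfold Spec_maximize_sculpture_attractiveness
  unfold maximize_sculpture_attractiveness maximize_sculpture_attractiveness_alt
  by_cases hn : 0 ≤ n
  · rw [bloopB_eq t n hn (Nat.sqrt n.toNat + 1) 1 (by omega) (by omega)]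
    rw [PySem.List.foldl_congr_mem (PySem.List.pyRange 2 n 1) _
        (fun ms i => if PySem.Int.mod n i = 0 ∧ 3 ≤ PySem.Int.floordiv n i
          then max ms (cmx t n.toNat i.toNat) else ms) _
        (by
          intro acc x hx
          have hx2 : 2 ≤ x := (PySem.List.mem_pyRange_one.mp hx).1
          dsimp only
          by_cases hc : PySem.Int.mod n x = 0 ∧ 3 ≤ PySem.Int.floordiv n x
          · rw [if_pos hc, if_pos hc, innerA_eq t n hn x hx2 acc]
          · rw [if_neg hc, if_neg hc])]
    rw [PySem.List.foldl_ite_eq_foldl_filter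
        (fun i => PySem.Int.mod n i = 0 ∧ 3 ≤ PySem.Int.floordiv n i)]
    exact (foldl_max_ext (fun i => cmx t n.toNat i.toNat) _ _ (cands_mem n hn) _).symm
  · have h2 : PySem.List.pyRange 2 n 1 = [] := PySem.List.pyRange_one_eq_nil (by omega)
    rw [h2, bloopB, dif_neg (by omega)]
    rfl
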